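-- pv_equiv track=rewrite | github.com/nisbh/MORPH | app.py | _build_filter_counts
-- ===== SOURCE A (Python) =====
-- from typing import Any
--
-- TYPE_FILTER_VALUES = ("bot", "human")
--
-- RISK_FILTER_VALUES = ("low", "medium", "high")
--
-- INTENT_FILTER_VALUES = ("recon", "exploit", "persistence")
--
-- def _build_filter_counts(rows: list[dict[str, Any]]) -> dict[str, dict[str, int]]:
--     """Build count metadata for each sidebar filter option."""
--     counts = {
--         "type": {key: 0 for key in TYPE_FILTER_VALUES},
--         "risk": {key: 0 for key in RISK_FILTER_VALUES},
--         "intent": {key: 0 for key in INTENT_FILTER_VALUES},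
--     }
--
--     for row in rows:
--         classification = row.get("classification") or {}
--
--         row_type = (classification.get("type") or "").lower()
--         if row_type in counts["type"]:
--             counts["type"][row_type] += 1
--
--         row_risk = (classification.get("risk") or "").lower()
--         if row_risk in counts["risk"]:
--             counts["risk"][row_risk] += 1
--
--         row_intent = (classification.get("intent") or "").lower()
--         if row_intent in counts["intent"]:
--             counts["intent"][row_intent] += 1
--
--     return counts
-- ===== SOURCE B (Python) =====
-- from collections import Counter
--
-- TYPE_FILTER_VALUES = ("bot", "human")
-- RISK_FILTER_VALUES = ("low", "medium", "high")
-- INTENT_FILTER_VALUES = ("recon", "exploit", "persistence")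
--
--
-- def _norm(row, field):
--     return ((row.get("classification") or {}).get(field) or "").lower()
--
--
-- def _build_filter_counts(rows):
--     """Three frequency tables, then a projection onto the allowed option tuples."""
--     type_counter = Counter(_norm(row, "type") for row in rows)
--     risk_counter = Counter(_norm(row, "risk") for row in rows)
--     intent_counter = Counter(_norm(row, "intent") for row in rows)
--     return {
--         "type": {k: type_counter.get(k, 0) for k in TYPE_FILTER_VALUES},
--         "risk": {k: risk_counter.get(k, 0) for k in RISK_FILTER_VALUES},
--         "intent": {k: intent_counter.get(k, 0) for k in INTENT_FILTER_VALUES},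
--     }
-- ===== Notes on version B (the rewrite author's own statement) =====
-- stated objective: alternative
-- what changed: A fuses everything into one pass that conditionally increments a pre-seeded nested dict; B makes one Counter pass per field and then projects the counters onto the allowed value tuples.
import Mathlib
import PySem

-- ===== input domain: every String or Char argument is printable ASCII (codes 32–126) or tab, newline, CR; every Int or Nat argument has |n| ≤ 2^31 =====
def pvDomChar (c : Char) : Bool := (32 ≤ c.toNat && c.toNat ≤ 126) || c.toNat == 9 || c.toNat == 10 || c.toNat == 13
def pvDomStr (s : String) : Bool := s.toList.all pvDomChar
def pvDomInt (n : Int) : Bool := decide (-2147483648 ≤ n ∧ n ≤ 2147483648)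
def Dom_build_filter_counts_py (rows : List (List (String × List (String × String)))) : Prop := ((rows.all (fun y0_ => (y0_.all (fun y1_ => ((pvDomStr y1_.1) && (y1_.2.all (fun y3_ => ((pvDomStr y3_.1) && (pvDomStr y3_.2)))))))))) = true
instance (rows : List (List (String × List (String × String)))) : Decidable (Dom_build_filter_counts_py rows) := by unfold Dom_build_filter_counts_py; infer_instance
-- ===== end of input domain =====

-- B replaces A's single fused guarded-increment pass by three per-field Counter passes plus a
-- projection onto the allowed value tuples (objective: alternative decomposition, same cost).

-- ===== PORT A =====
-- A's fused loop; the state is the three inner count dicts (the outer dict's keys are the three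
-- fixed literals and are never touched, only the inner dicts are mutated), assembled at the end.
def aStep (s : (PySem.Dict String Int) × (PySem.Dict String Int) × (PySem.Dict String Int))
    (row : List (String × List (String × String))) :
    (PySem.Dict String Int) × (PySem.Dict String Int) × (PySem.Dict String Int) :=
  let classification := (List.lookup "classification" row).getD []
  let row_type := PySem.Str.lower ((List.lookup "type" classification).getD "")
  let td := if s.1.contains row_type then s.1.modify row_type 0 (· + 1) else s.1
  let row_risk := PySem.Str.lower ((List.lookup "risk" classification).getD "")
  let rd := if s.2.1.contains row_risk then s.2.1.modify row_risk 0 (· + 1) else s.2.1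
  let row_intent := PySem.Str.lower ((List.lookup "intent" classification).getD "")
  let idd := if s.2.2.contains row_intent then s.2.2.modify row_intent 0 (· + 1) else s.2.2
  (td, rd, idd)

def build_filter_counts_py (rows : List (List (String × List (String × String)))) : List (String × List (String × Int)) :=
  let init : (PySem.Dict String Int) × (PySem.Dict String Int) × (PySem.Dict String Int) :=
    (PySem.Dict.ofList (["bot", "human"].map (fun k => (k, (0 : Int)))),
     PySem.Dict.ofList (["low", "medium", "high"].map (fun k => (k, (0 : Int)))),
     PySem.Dict.ofList (["recon", "exploit", "persistence"].map (fun k => (k, (0 : Int)))))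
  let final := rows.foldl aStep init
  [("type", final.1.items), ("risk", final.2.1.items), ("intent", final.2.2.items)]

-- ===== PORT B =====
def bNorm (row : List (String × List (String × String))) (field : String) : String :=
  PySem.Str.lower ((List.lookup field ((List.lookup "classification" row).getD [])).getD "")

def build_filter_counts_py_alt (rows : List (List (String × List (String × String)))) : List (String × List (String × Int)) :=
  let type_counter := PySem.Dict.counter (rows.map (fun row => bNorm row "type"))
  let risk_counter := PySem.Dict.counter (rows.map (fun row => bNorm row "risk"))
  let intent_counter := PySem.Dict.counter (rows.map (fun row => bNorm row "intent"))
  [("type", ["bot", "human"].map (fun k => (k, type_counter.getD k 0))),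
   ("risk", ["low", "medium", "high"].map (fun k => (k, risk_counter.getD k 0))),
   ("intent", ["recon", "exploit", "persistence"].map (fun k => (k, intent_counter.getD k 0)))]

-- ===== PRECONDITION & SPEC =====
def Spec_build_filter_counts_py (rows : List (List (String × List (String × String)))) (out : List (String × List (String × Int))) : Prop := out = build_filter_counts_py_alt rows
instance (rows : List (List (String × List (String × String)))) (out : List (String × List (String × Int))) : Decidable (Spec_build_filter_counts_py rows out) := by unfold Spec_build_filter_counts_py; infer_instance

-- ===== CLAIM (what is proved, stated in full; the proofs are below) =====
def Claim_equal_build_filter_counts_py : Prop := ∀ (rows : List (List (String × List (String × String)))), Dom_build_filter_counts_py rows → Spec_build_filter_counts_py rows (build_filter_counts_py rows)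

-- ===== LEMMAS AND PROOFS =====

-- the guarded-increment step, keyed by the already-normalised string
def cstep (d : PySem.Dict String Int) (x : String) : PySem.Dict String Int :=
  if d.contains x then d.modify x 0 (· + 1) else d

lemma keys_cstep (d : PySem.Dict String Int) (x : String) : (cstep d x).keys = d.keys := by
  unfold cstep
  split
  next h =>
    rw [PySem.Dict.keys_modify, PySem.Dict.keys_insert_of_contains]
    simpa using h
  · rfl

lemma keys_fold_cstep (xs : List String) (d : PySem.Dict String Int) :
    (xs.foldl cstep d).keys = d.keys := by
  induction xs generalizing d with
  | nil => rfl
  | cons x xs ih => simp [List.foldl, ih, keys_cstep]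

lemma contains_cstep (d : PySem.Dict String Int) (x k : String) :
    (cstep d x).contains k = d.contains k := by
  rw [PySem.Dict.contains_eq_decide_mem_keys, PySem.Dict.contains_eq_decide_mem_keys, keys_cstep]

lemma getD_fold_cstep (xs : List String) (d : PySem.Dict String Int) (k : String)
    (hk : d.contains k = true) :
    (xs.foldl cstep d).getD k 0 = d.getD k 0 + xs.count k := by
  induction xs generalizing d with
  | nil => simp
  | cons x xs ih =>
    rw [List.foldl_cons, ih (cstep d x) (by rw [contains_cstep]; exact hk), List.count_cons]
    unfold cstep
    by_cases hx : x = k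
    · subst hx
      simp [hk, PySem.Dict.getD_modify_self]
      ring
    · split
      · rw [PySem.Dict.getD_modify_of_ne _ 0 _ (Ne.symm hx)]
        simp [hx]
      · simp [hx]

-- one field of A: fold from the zero-seeded dict yields the projection of the counts
lemma field_items (vals : List String) (xs : List String)
    (hnd : (PySem.Dict.ofList (vals.map (fun k => (k, (0 : Int))))).keys.Nodup)
    (hkeys : (PySem.Dict.ofList (vals.map (fun k => (k, (0 : Int))))).keys = vals)
    (hget : ∀ k ∈ vals, (PySem.Dict.ofList (vals.map (fun k => (k, (0 : Int))))).contains k = true ∧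
        (PySem.Dict.ofList (vals.map (fun k => (k, (0 : Int))))).getD k 0 = 0) :
    (xs.foldl cstep (PySem.Dict.ofList (vals.map (fun k => (k, (0 : Int)))))).items
      = vals.map (fun k => (k, (xs.count k : Int))) := by
  set d0 := PySem.Dict.ofList (vals.map (fun k => (k, (0 : Int))))
  rw [PySem.Dict.items_eq_map_keys _ (by rw [keys_fold_cstep]; exact hnd) 0, keys_fold_cstep, hkeys]
  apply List.map_congr_left
  intro k hk
  rw [getD_fold_cstep xs d0 k (hget k hk).1, (hget k hk).2, zero_add]

-- A's fold over rows splits into the three independent per-field folds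
lemma foldl_split (rows : List (List (String × List (String × String))))
    (a b c : PySem.Dict String Int) :
    rows.foldl aStep (a, b, c)
      = ((rows.map (fun row => bNorm row "type")).foldl cstep a,
         (rows.map (fun row => bNorm row "risk")).foldl cstep b,
         (rows.map (fun row => bNorm row "intent")).foldl cstep c) := by
  induction rows generalizing a b c with
  | nil => rfl
  | cons r rows ih =>
    simp only [List.foldl_cons, List.map_cons]
    rw [show aStep (a, b, c) r
        = (cstep a (bNorm r "type"), cstep b (bNorm r "risk"), cstep c (bNorm r "intent")) from rfl]
    exact ih _ _ _

-- ===== VERDICT (by name: the statement is the Claim_ definition above) =====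
theorem build_filter_counts_py_spec : Claim_equal_build_filter_counts_py := by
  intro rows _
  unfold Spec_build_filter_counts_py build_filter_counts_py build_filter_counts_py_alt
  simp only [foldl_split]
  rw [field_items ["bot", "human"] _ (by decide) (by decide) (by decide),
      field_items ["low", "medium", "high"] _ (by decide) (by decide) (by decide),
      field_items ["recon", "exploit", "persistence"] _ (by decide) (by decide) (by decide)]
  simp [PySem.Dict.getD_counter]
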